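-- pv_equiv track=rewrite | github.com/diamantegut/sistema-almareia-mirapraia | scripts/maintenance/fix_routes.py | build_auto_map
-- ===== SOURCE A (Python) =====
-- def build_auto_map(endpoints):
--     auto_map = {}
--     basename_counts = {}
--
--     # First pass: count basenames
--     for ep in endpoints:
--         parts = ep.split('.')
--         if len(parts) >= 2:
--             basename = parts[-1]
--             basename_counts[basename] = basename_counts.get(basename, 0) + 1
--
--     # Second pass: build map for unique basenames
--     for ep in endpoints:
--         parts = ep.split('.')
--         if len(parts) >= 2:
--             basename = parts[-1]
--             # Special case: if basename is same as endpoint (no dot), ignore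
--             if basename_counts[basename] == 1:
--                 auto_map[basename] = ep
--
--     return auto_map
-- ===== SOURCE B (Python) =====
-- def build_auto_map(endpoints):
--     # Single pass: group full endpoints by basename, then keep the singleton groups.
--     groups = {}
--     for ep in endpoints:
--         parts = ep.split('.')
--         if len(parts) >= 2:
--             groups.setdefault(parts[-1], []).append(ep)
--     return {b: eps[0] for b, eps in groups.items() if len(eps) == 1}
-- ===== Notes on version B (the rewrite author's own statement) =====
-- stated objective: simpler
-- what changed: Replaces A's two scans over endpoints with an integer count table by one grouping pass building a basename->endpoints index plus a comprehension over that index keeping singleton groups.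
import Mathlib
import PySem

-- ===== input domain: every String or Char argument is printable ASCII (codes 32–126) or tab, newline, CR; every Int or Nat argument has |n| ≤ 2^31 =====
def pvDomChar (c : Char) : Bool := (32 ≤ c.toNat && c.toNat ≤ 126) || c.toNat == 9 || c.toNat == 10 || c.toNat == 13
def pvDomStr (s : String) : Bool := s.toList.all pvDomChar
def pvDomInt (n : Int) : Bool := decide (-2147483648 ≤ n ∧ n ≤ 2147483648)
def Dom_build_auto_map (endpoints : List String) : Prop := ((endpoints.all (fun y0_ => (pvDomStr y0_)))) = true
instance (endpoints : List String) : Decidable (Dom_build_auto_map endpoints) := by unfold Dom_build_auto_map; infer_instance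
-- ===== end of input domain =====

-- B replaces A's two scans over endpoints with a count table by one grouping pass
-- (basename -> list of endpoints) followed by a pass over the index keeping singleton
-- groups; same return value, simpler shape.


-- ===== PORT A =====
-- shared helpers for 'parts = ep.split('.')' and 'basename = parts[-1]' (both Pythons
-- compute exactly these): split? is exact for the non-empty separator ".", so the
-- default [] of getD is never used; parts is never empty, so pyGetD's default "" is never used.
def pvParts (ep : String) : List String := (PySem.Str.split? ep ".").getD []
def pvBase (ep : String) : String := PySem.List.pyGetD (pvParts ep) (-1) ""

def build_auto_map (endpoints : List String) : List (String × String) :=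
  -- first pass: count basenames
  let counts : PySem.Dict String Int :=
    endpoints.foldl (fun d ep =>
      if 2 ≤ (pvParts ep).length then
        d.insert (pvBase ep) (d.getD (pvBase ep) 0 + 1)
      else d) PySem.Dict.empty
  -- second pass: build map for unique basenames
  -- (counts[basename] cannot raise here — the key was counted in the first pass — so getD is exact)
  let auto_map : PySem.Dict String String :=
    endpoints.foldl (fun d ep =>
      if 2 ≤ (pvParts ep).length then
        if counts.getD (pvBase ep) 0 = 1 then d.insert (pvBase ep) ep else d
      else d) PySem.Dict.empty
  auto_map.items

-- ===== PORT B =====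
def build_auto_map_alt (endpoints : List String) : List (String × String) :=
  -- single grouping pass: groups.setdefault(basename, []).append(ep)
  let groups : PySem.Dict String (List String) :=
    endpoints.foldl (fun d ep =>
      if 2 ≤ (pvParts ep).length then
        d.modify (pvBase ep) [] (fun eps => eps ++ [ep])
      else d) PySem.Dict.empty
  -- dict comprehension over the index: {b: eps[0] for b, eps in groups.items() if len(eps) == 1}
  (groups.items.foldl (fun d p =>
      if p.2.length = 1 then d.insert p.1 (PySem.List.pyGetD p.2 0 "") else d)
    (PySem.Dict.empty : PySem.Dict String String)).items

-- ===== PRECONDITION & SPEC =====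
def Spec_build_auto_map (endpoints : List String) (out : List (String × String)) : Prop := out = build_auto_map_alt endpoints
instance (endpoints : List String) (out : List (String × String)) : Decidable (Spec_build_auto_map endpoints out) := by unfold Spec_build_auto_map; infer_instance

-- ===== CLAIM (what is proved, stated in full; the proofs are below) =====
def Claim_equal_build_auto_map : Prop := ∀ (endpoints : List String), Dom_build_auto_map endpoints → Spec_build_auto_map endpoints (build_auto_map endpoints)

-- ===== LEMMAS AND PROOFS =====

-- proof-side abbreviations: the qualifying endpoints, their basenames, and the
-- endpoints whose basename occurs exactly once among qualifying endpoints
def pvQs (endpoints : List String) : List String :=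
  endpoints.filter (fun ep => decide (2 ≤ (pvParts ep).length))
def pvK (endpoints : List String) : List String := (pvQs endpoints).map pvBase
def pvUniq (endpoints : List String) : List String :=
  (pvQs endpoints).filter (fun e => (pvK endpoints).count (pvBase e) == 1)

-- a fold whose body is guarded by `if P a` is the unguarded fold over the filtered list
theorem pv_foldl_guard {σ α : Type} (P : α → Prop) [DecidablePred P] (f : σ → α → σ) :
    ∀ (l : List α) (s : σ),
      l.foldl (fun s a => if P a then f s a else s) s
        = (l.filter (fun a => decide (P a))).foldl f s := by
  intro l
  induction l with
  | nil => intro s; rfl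
  | cons a l ih =>
    intro s
    by_cases h : P a <;> simp [h, ih]

-- A's first pass is Counter(basenames of qualifying endpoints)
theorem pv_counts_eq (E : List String) :
    (E.foldl (fun d ep =>
        if 2 ≤ (pvParts ep).length then
          d.insert (pvBase ep) (d.getD (pvBase ep) 0 + 1)
        else d) PySem.Dict.empty)
      = PySem.Dict.counter (pvK E) := by
  refine Eq.trans (pv_foldl_guard (σ := PySem.Dict String Int) (fun ep => 2 ≤ (pvParts ep).length)
    (fun d ep => d.insert (pvBase ep) (d.getD (pvBase ep) 0 + 1)) E PySem.Dict.empty) ?_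
  rw [show pvK E = (pvQs E).map pvBase from rfl, ← PySem.Dict.foldl_insert_getD_add_one_eq_counter,
    List.foldl_map]
  rfl

-- the basenames of the unique-basename endpoints, as a filter of the basename list
theorem pv_map_uniq (E : List String) :
    (pvUniq E).map pvBase = (pvK E).filter (fun b => (pvK E).count b == 1) := by
  unfold pvUniq pvK
  rw [List.filter_map]
  rfl

theorem pv_nodup_map_uniq (E : List String) : ((pvUniq E).map pvBase).Nodup := by
  rw [pv_map_uniq, List.nodup_iff_count_le_one]
  intro a
  by_cases hp : (pvK E).count a = 1
  · rw [List.count_filter (p := fun b => (pvK E).count b == 1) (by simpa using hp)]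
    omega
  · have h0 : List.count a (List.filter (fun b => (pvK E).count b == 1) (pvK E)) = 0 := by
      rw [List.count_eq_zero]
      intro hmem
      exact hp (by simpa using List.of_mem_filter hmem)
    omega

-- A computes the unique-basename endpoints in order
theorem pv_A_eq (E : List String) :
    build_auto_map E = (pvUniq E).map (fun e => (pvBase e, e)) := by
  have h1 := pv_foldl_guard (σ := PySem.Dict String String)
    (fun ep => 2 ≤ (pvParts ep).length)
    (fun d ep =>
      if (E.foldl (fun d ep =>
            if 2 ≤ (pvParts ep).length then d.insert (pvBase ep) (d.getD (pvBase ep) 0 + 1)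
            else d) (PySem.Dict.empty : PySem.Dict String Int)).getD (pvBase ep) 0 = 1
      then d.insert (pvBase ep) ep else d) E PySem.Dict.empty
  have h2 := pv_foldl_guard (σ := PySem.Dict String String)
    (fun ep =>
      (E.foldl (fun d ep =>
            if 2 ≤ (pvParts ep).length then d.insert (pvBase ep) (d.getD (pvBase ep) 0 + 1)
            else d) (PySem.Dict.empty : PySem.Dict String Int)).getD (pvBase ep) 0 = 1)
    (fun d ep => d.insert (pvBase ep) ep) (pvQs E) PySem.Dict.empty
  have h3 : (pvQs E).filter (fun ep =>
      decide ((E.foldl (fun d ep =>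
            if 2 ≤ (pvParts ep).length then d.insert (pvBase ep) (d.getD (pvBase ep) 0 + 1)
            else d) (PySem.Dict.empty : PySem.Dict String Int)).getD (pvBase ep) 0 = 1))
      = pvUniq E := by
    rw [pv_counts_eq E]
    apply List.filter_congr
    intro e _
    simp [PySem.Dict.getD_counter, Nat.cast_eq_one, beq_eq_decide]
  have h4 := PySem.Dict.items_foldl_insert_fresh (pvUniq E) pvBase (fun e => e)
    PySem.Dict.empty (fun a _ => rfl) (pv_nodup_map_uniq E)
  exact (congrArg PySem.Dict.items (h1.trans (h2.trans (by rw [h3])))).trans (by simpa using h4)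

-- group contents: groups[b] is exactly the qualifying endpoints with basename b
theorem pv_groups_getD (E : List String) (b : String) :
    (E.foldl (fun d ep =>
        if 2 ≤ (pvParts ep).length then
          d.modify (pvBase ep) [] (fun eps => eps ++ [ep])
        else d) PySem.Dict.empty).getD b []
      = (pvQs E).filter (fun e => pvBase e == b) := by
  have h1 := pv_foldl_guard (σ := PySem.Dict String (List String))
    (fun ep => 2 ≤ (pvParts ep).length)
    (fun d ep => d.modify (pvBase ep) [] (fun eps => eps ++ [ep])) E PySem.Dict.empty
  have h2 : (pvQs E).foldl
        (fun d ep => d.modify (pvBase ep) [] (fun eps => eps ++ [ep])) PySem.Dict.empty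
      = ((pvQs E).map (fun e => (pvBase e, e))).foldl
        (fun d p => d.modify p.1 [] (fun eps => eps ++ [p.2])) PySem.Dict.empty :=
    (List.foldl_map (f := fun e => (pvBase e, e))
      (g := fun d p => d.modify p.1 [] (fun eps => eps ++ [p.2]))
      (l := pvQs E) (init := PySem.Dict.empty)).symm
  have h3 := PySem.Dict.getD_foldl_modify_append
    ((pvQs E).map (fun e => (pvBase e, e))) PySem.Dict.empty b
  exact (congrArg (fun d => PySem.Dict.getD d b []) (h1.trans h2)).trans
    (h3.trans (by simp [List.filter_map, Function.comp_def]))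

-- counting a basename = measuring its group
theorem pv_count_len (E : List String) (k : String) :
    (pvK E).count k = ((pvQs E).filter (fun e => pvBase e == k)).length := by
  unfold pvK
  rw [List.count_eq_countP, List.countP_map, ← List.countP_eq_length_filter]
  rfl

-- an endpoint whose basename is unique is alone in its group
theorem pv_filter_singleton (E : List String) (e : String) (he : e ∈ pvUniq E) :
    (pvQs E).filter (fun x => pvBase x == pvBase e) = [e] := by
  have hq : e ∈ pvQs E := List.mem_of_mem_filter he
  have hc : (pvK E).count (pvBase e) = 1 := by simpa using List.of_mem_filter he
  have hlen : ((pvQs E).filter (fun x => pvBase x == pvBase e)).length = 1 := by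
    rw [← pv_count_len]; exact hc
  obtain ⟨a, ha⟩ := List.length_eq_one_iff.mp hlen
  have : e ∈ (pvQs E).filter (fun x => pvBase x == pvBase e) :=
    List.mem_filter.mpr ⟨hq, by simp⟩
  rw [ha] at this ⊢
  simp_all

-- the unique elements of a list, filtered to those occurring once, in first-occurrence
-- order, are exactly the list filtered to elements occurring once
theorem pv_set_filter_unique (l : List String) :
    (PySem.Set.ofList l).filter (fun b => l.count b == 1)
      = l.filter (fun b => l.count b == 1) := by
  induction l with
  | nil => rfl
  | cons x xs ih =>
    rw [PySem.Set.ofList_cons, List.filter_cons, List.filter_cons,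
      show PySem.Set.discard (PySem.Set.ofList xs) x
          = (PySem.Set.ofList xs).filter (fun y => !y == x) from rfl,
      List.filter_filter]
    by_cases hx : x ∈ xs
    · have hpx : ((x :: xs).count x == 1) = false := by
        have := List.count_pos_iff.mpr hx
        simp only [List.count_cons, beq_eq_decide]
        simp
        omega
      rw [if_neg (by rw [hpx]; simp), if_neg (by rw [hpx]; simp)]
      have hq : ∀ a : String,
          ((x :: xs).count a == 1) = (!(a == x) && (xs.count a == 1)) := by
        intro a
        by_cases hax : a = x
        · subst hax
          have := List.count_pos_iff.mpr hx
          simp [beq_eq_decide]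
          omega
        · simp [beq_eq_decide, hax, Ne.symm hax]
      calc List.filter (fun a => ((x :: xs).count a == 1) && !(a == x)) (PySem.Set.ofList xs)
          = List.filter (fun a => !(a == x) && (xs.count a == 1)) (PySem.Set.ofList xs) := by
            apply List.filter_congr; intro a _
            rw [hq a]; cases h : a == x <;> simp
        _ = List.filter (fun a => !(a == x))
              (List.filter (fun b => xs.count b == 1) (PySem.Set.ofList xs)) :=
            List.filter_filter.symm
        _ = List.filter (fun a => !(a == x))
              (List.filter (fun b => xs.count b == 1) xs) := by rw [ih]
        _ = List.filter (fun a => !(a == x) && (xs.count a == 1)) xs := by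
            rw [List.filter_filter]
        _ = List.filter (fun a => (x :: xs).count a == 1) xs := by
            apply List.filter_congr; intro a _; rw [hq a]
    · have hpx : ((x :: xs).count x == 1) = true := by
        simp [List.count_eq_zero.mpr hx]
      rw [if_pos hpx, if_pos hpx]
      congr 1
      have hq : ∀ a : String, a ≠ x →
          ((x :: xs).count a == 1) = (xs.count a == 1) := by
        intro a hax
        simp [beq_eq_decide, Ne.symm hax]
      calc List.filter (fun a => ((x :: xs).count a == 1) && !(a == x)) (PySem.Set.ofList xs)
          = List.filter (fun b => xs.count b == 1) (PySem.Set.ofList xs) := by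
            apply List.filter_congr; intro a ha
            have hax : a ≠ x := by
              intro h; subst h; exact hx ((PySem.Set.mem_ofList _ _).mp ha)
            simp [hq a hax, hax]
        _ = List.filter (fun b => xs.count b == 1) xs := ih
        _ = List.filter (fun a => (x :: xs).count a == 1) xs := by
            apply List.filter_congr; intro a ha
            have hax : a ≠ x := by intro h; subst h; exact hx ha
            rw [hq a hax]

theorem pv_B_eq (E : List String) :
    build_auto_map_alt E = (pvUniq E).map (fun e => (pvBase e, e)) := by
  simp only [build_auto_map_alt]
  set G : PySem.Dict String (List String) := E.foldl (fun d ep =>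
      if 2 ≤ (pvParts ep).length then
        d.modify (pvBase ep) [] (fun eps => eps ++ [ep])
      else d) PySem.Dict.empty with hG
  have h1 : G = (pvQs E).foldl
      (fun d ep => d.modify (pvBase ep) [] (fun eps => eps ++ [ep])) PySem.Dict.empty :=
    pv_foldl_guard (σ := PySem.Dict String (List String))
      (fun ep => 2 ≤ (pvParts ep).length)
      (fun d ep => d.modify (pvBase ep) [] (fun eps => eps ++ [ep])) E PySem.Dict.empty
  have hg : ∀ k, G.getD k [] = (pvQs E).filter (fun e => pvBase e == k) :=
    fun k => pv_groups_getD E k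
  have hk : G.keys = PySem.Set.ofList (pvK E) := by
    rw [h1]
    refine Eq.trans (PySem.Dict.keys_foldl_modify_key (pvQs E) pvBase []
      (fun _ ep eps => eps ++ [ep]) PySem.Dict.empty) ?_
    rw [PySem.Dict.keys_empty, PySem.Set.update_nil_left]
    rfl
  have hnd : G.keys.Nodup := by rw [hk]; exact PySem.Set.nodup_ofList _
  have hitems : G.items
      = (PySem.Set.ofList (pvK E)).map
          (fun k => (k, (pvQs E).filter (fun e => pvBase e == k))) := by
    rw [PySem.Dict.items_eq_map_keys G hnd [], hk]
    exact List.map_congr_left (fun k _ => by rw [hg k])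
  have h5 : G.items.foldl (fun d p =>
        if p.2.length = 1 then d.insert p.1 (PySem.List.pyGetD p.2 0 "") else d)
        (PySem.Dict.empty : PySem.Dict String String)
      = (G.items.filter (fun p => decide (p.2.length = 1))).foldl
        (fun d p => d.insert p.1 (PySem.List.pyGetD p.2 0 "")) PySem.Dict.empty :=
    pv_foldl_guard (σ := PySem.Dict String String)
      (fun p : String × List String => p.2.length = 1)
      (fun d p => d.insert p.1 (PySem.List.pyGetD p.2 0 "")) G.items PySem.Dict.empty
  have hsub : ((G.items.filter (fun p => decide (p.2.length = 1))).map Prod.fst).Nodup := by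
    have hkeys : (G.items.map Prod.fst).Nodup := hnd
    exact hkeys.sublist (List.Sublist.map Prod.fst List.filter_sublist)
  have h6 := PySem.Dict.items_foldl_insert_fresh
    (G.items.filter (fun p => decide (p.2.length = 1))) Prod.fst
    (fun p => PySem.List.pyGetD p.2 0 "") PySem.Dict.empty (fun a _ => rfl) hsub
  rw [h5, h6]
  rw [hitems, List.filter_map]
  have hcong : ∀ k ∈ PySem.Set.ofList (pvK E),
      ((fun p : String × List String => decide (p.2.length = 1))
        ∘ fun k => (k, (pvQs E).filter (fun e => pvBase e == k))) k
      = ((pvK E).count k == 1) := by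
    intro k _
    simp only [Function.comp_apply]
    rw [← pv_count_len E k, ← beq_eq_decide]
  rw [List.filter_congr hcong, pv_set_filter_unique, ← pv_map_uniq,
    List.map_map, List.map_map,
    show PySem.Dict.empty.items = ([] : List (String × String)) from rfl,
    List.nil_append]
  apply List.map_congr_left
  intro e he
  simp only [Function.comp_apply]
  rw [pv_filter_singleton E e he]
  rfl

-- ===== VERDICT (by name: the statement is the Claim_ definition above) =====
theorem build_auto_map_spec : Claim_equal_build_auto_map := by
  intro E _
  unfold Spec_build_auto_map
  rw [pv_A_eq, pv_B_eq]
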